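-- pv_equiv track=rewrite | github.com/magartrantit/Python-Cazan-Rares-2024 | Tema3/Pb6.py | dup_unq
-- ===== SOURCE A (Python) =====
-- def dup_unq(l):
--     a = set()
--     b = set()
--
--     for i in l:
--         if i in a:
--             b.add(i)
--             a.discard(i)
--         else:
--             a.add(i)
--     return (len(a), len(b))
-- ===== SOURCE B (Python) =====
-- def dup_unq(l):
--     counts = {}
--     for i in l:
--         counts[i] = counts.get(i, 0) + 1
--     odd = sum(1 for c in counts.values() if c % 2 == 1)
--     dup = sum(1 for c in counts.values() if c >= 2)
--     return (odd, dup)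
-- ===== Notes on version B (the rewrite author's own statement) =====
-- stated objective: simpler
-- what changed: Replaced the two-set parity/seen-twice toggling trick by a single frequency dict built in one pass, from which the odd-frequency and duplicate counts are read off in two value scans.
import Mathlib
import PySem

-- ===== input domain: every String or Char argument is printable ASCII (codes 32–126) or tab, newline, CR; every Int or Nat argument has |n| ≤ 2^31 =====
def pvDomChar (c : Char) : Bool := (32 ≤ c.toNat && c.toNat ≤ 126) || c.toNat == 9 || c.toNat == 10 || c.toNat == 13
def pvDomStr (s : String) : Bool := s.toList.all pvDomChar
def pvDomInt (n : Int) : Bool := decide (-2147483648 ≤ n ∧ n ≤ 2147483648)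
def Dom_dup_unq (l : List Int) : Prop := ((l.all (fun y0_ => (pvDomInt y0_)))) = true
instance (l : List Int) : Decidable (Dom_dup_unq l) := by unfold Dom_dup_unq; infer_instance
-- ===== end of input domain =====

-- B replaces A's two-set parity/seen-twice toggling by one frequency dict read off in two value scans (simpler; same average cost).

-- ===== PORT A =====
def dup_unq (l : List Int) : Int × Int :=
  let st := l.foldl
    (fun (st : PySem.Set Int × PySem.Set Int) i =>
      if PySem.Set.contains st.1 i then
        (PySem.Set.discard st.1 i, PySem.Set.add st.2 i)
      else
        (PySem.Set.add st.1 i, st.2))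
    (PySem.Set.empty, PySem.Set.empty)
  (PySem.Set.len st.1, PySem.Set.len st.2)

-- ===== PORT B =====
def dup_unq_alt (l : List Int) : Int × Int :=
  let counts := l.foldl (fun (d : PySem.Dict Int Int) i => d.insert i (d.getD i 0 + 1)) PySem.Dict.empty
  let odd : Int := ((counts.values.filter (fun c => PySem.Int.mod c 2 == 1)).length : Int)
  let dup : Int := ((counts.values.filter (fun c => 2 ≤ c)).length : Int)
  (odd, dup)

-- ===== PRECONDITION & SPEC =====
def Spec_dup_unq (l : List Int) (out : Int × Int) : Prop := out = dup_unq_alt l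
instance (l : List Int) (out : Int × Int) : Decidable (Spec_dup_unq l out) := by unfold Spec_dup_unq; infer_instance

-- ===== CLAIM (what is proved, stated in full; the proofs are below) =====
def Claim_equal_dup_unq : Prop := ∀ (l : List Int), Dom_dup_unq l → Spec_dup_unq l (dup_unq l)

-- ===== LEMMAS AND PROOFS =====

-- Two nodup lists with the same members have the same length.
theorem length_eq_of_nodup_of_mem {α : Type} [DecidableEq α] {s t : List α}
    (hs : s.Nodup) (ht : t.Nodup) (h : ∀ x, x ∈ s ↔ x ∈ t) : s.length = t.length := by
  have := List.Perm.length_eq ((List.perm_ext_iff_of_nodup hs ht).mpr h)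
  exact this

-- Invariant of A's loop: after processing l, the first set holds exactly the
-- odd-frequency elements and the second exactly the duplicated ones, both nodup.
theorem dup_unq_loop_inv (l : List Int) :
    let st := l.foldl
      (fun (st : PySem.Set Int × PySem.Set Int) i =>
        if PySem.Set.contains st.1 i then
          (PySem.Set.discard st.1 i, PySem.Set.add st.2 i)
        else
          (PySem.Set.add st.1 i, st.2))
      (PySem.Set.empty, PySem.Set.empty)
    st.1.Nodup ∧ st.2.Nodup ∧ (∀ x, x ∈ st.1 ↔ l.count x % 2 = 1) ∧
      (∀ x, x ∈ st.2 ↔ 2 ≤ l.count x) := by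
  induction l using List.reverseRecOn with
  | nil => simp [PySem.Set.empty]
  | append_singleton p i ih =>
    obtain ⟨ha, hb, hma, hmb⟩ := ih
    rw [List.foldl_append]
    set st := p.foldl
      (fun (st : PySem.Set Int × PySem.Set Int) i =>
        if PySem.Set.contains st.1 i then
          (PySem.Set.discard st.1 i, PySem.Set.add st.2 i)
        else
          (PySem.Set.add st.1 i, st.2))
      (PySem.Set.empty, PySem.Set.empty) with hst
    have hcount : ∀ x : Int, (p ++ [i]).count x = p.count x + (if x = i then 1 else 0) := by
      intro x
      by_cases h : x = i
      · subst h; simp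
      · have h' : ¬ i = x := fun hh => h hh.symm
        simp [List.count_append, h, h']
    simp only [List.foldl_cons, List.foldl_nil]
    by_cases hmem : i ∈ st.1
    · have hc : PySem.Set.contains st.1 i = true := (PySem.Set.contains_iff _ _).mpr hmem
      simp only [hc, if_true]
      refine ⟨PySem.Set.nodup_discard _ _ ha, PySem.Set.nodup_add _ _ hb, ?_, ?_⟩
      · intro x
        rw [PySem.Set.mem_discard, hma, hcount]
        by_cases h : x = i
        · subst h
          have : p.count x % 2 = 1 := (hma x).mp hmem
          simp [this]
          omega
        · simp [h]
      · intro x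
        rw [PySem.Set.mem_add, hmb, hcount]
        by_cases h : x = i
        · subst h
          have : p.count x % 2 = 1 := (hma x).mp hmem
          simp
          exact List.count_pos_iff.mp (by omega)
        · simp [h]
    · have hc : PySem.Set.contains st.1 i = false := by
        rw [Bool.eq_false_iff]
        intro h
        exact hmem ((PySem.Set.contains_iff _ _).mp h)
      simp only [hc, Bool.false_eq_true, if_false]
      refine ⟨PySem.Set.nodup_add _ _ ha, hb, ?_, ?_⟩
      · intro x
        rw [PySem.Set.mem_add, hma, hcount]
        by_cases h : x = i
        · subst h
          have heven : ¬ (p.count x % 2 = 1) := fun h1 => hmem ((hma x).mpr h1)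
          simp
          omega
        · simp [h]
      · intro x
        rw [hmb, hcount]
        by_cases h : x = i
        · subst h
          have heven : ¬ (p.count x % 2 = 1) := fun h1 => hmem ((hma x).mpr h1)
          simp
          rw [← List.count_pos_iff]
          omega
        · simp [h]

-- B's value pairs: values of the counter are the per-key counts over the first-occurrence set.
theorem alt_values (l : List Int) :
    (l.foldl (fun (d : PySem.Dict Int Int) i => d.insert i (d.getD i 0 + 1)) PySem.Dict.empty).values
      = (PySem.Set.ofList l).map (fun k => (l.count k : Int)) := by
  rw [PySem.Dict.foldl_insert_getD_add_one_eq_counter]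
  have h := PySem.Dict.items_counter (xs := l)
  calc (PySem.Dict.counter l).values
      = (PySem.Dict.counter l).items.map (·.2) := rfl
    _ = ((PySem.Set.ofList l).map (fun k => (k, (l.count k : Int)))).map (·.2) := by rw [h]
    _ = (PySem.Set.ofList l).map (fun k => (l.count k : Int)) := by
        rw [List.map_map]; rfl

theorem filter_map_count (l : List Int) (p : Int → Bool) :
    ((PySem.Set.ofList l).map (fun k => (l.count k : Int))).filter p
      = ((PySem.Set.ofList l).filter (fun k => p (l.count k : Int))).map
          (fun k => (l.count k : Int)) := by
  rw [List.filter_map]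
  rfl

-- ===== VERDICT (by name: the statement is the Claim_ definition above) =====
theorem dup_unq_spec : Claim_equal_dup_unq := by
  intro l _
  unfold Spec_dup_unq dup_unq dup_unq_alt
  obtain ⟨ha, hb, hma, hmb⟩ := dup_unq_loop_inv l
  simp only [alt_values, PySem.Set.len, filter_map_count, List.length_map, Prod.mk.injEq]
  constructor
  · congr 1
    apply length_eq_of_nodup_of_mem ha (List.Nodup.filter _ (PySem.Set.nodup_ofList l))
    intro x
    rw [List.mem_filter, PySem.Set.mem_ofList, hma]
    constructor
    · intro h
      have hpos : 0 < l.count x := by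
        by_contra hc
        have : l.count x = 0 := by omega
        omega
      refine ⟨List.count_pos_iff.mp hpos, ?_⟩
      simp [PySem.Int.mod, Int.fmod_eq_emod]
      omega
    · rintro ⟨-, h⟩
      simp [PySem.Int.mod, Int.fmod_eq_emod] at h
      omega
  · congr 1
    apply length_eq_of_nodup_of_mem hb (List.Nodup.filter _ (PySem.Set.nodup_ofList l))
    intro x
    rw [List.mem_filter, PySem.Set.mem_ofList, hmb]
    constructor
    · intro h
      have hpos : 0 < l.count x := by omega
      refine ⟨List.count_pos_iff.mp hpos, ?_⟩
      simp
      omega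
    · rintro ⟨-, h⟩
      simp at h
      omega
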